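-- pv_equiv track=rewrite | github.com/PierreTsr/NLGS_Porject | src/metrics/alliteration.py | count_alliterations
-- ===== SOURCE A (Python) =====
-- def count_alliterations(accentuated: list[list[tuple[int,int]]], threshold: int) -> int:
--     n = 0
--     for accents in accentuated:
--         counts = {}
--         for word, cons in accents:
--             if cons not in counts.keys():
--                 counts[cons] = set()
--             counts[cons].add(word)
--         for val in counts.values():
--             if len(val) >= threshold:
--                 n += 1
--     return n
-- ===== SOURCE B (Python) =====
-- def count_alliterations(accentuated: list[list[tuple[int, int]]], threshold: int) -> int:
--     n = 0
--     for accents in accentuated: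
--         pairs = sorted(accents, key=lambda p: p[1])
--         while pairs:
--             c = pairs[0][1]
--             i = 1
--             while i < len(pairs) and pairs[i][1] == c:
--                 i += 1
--             if len({w for w, _ in pairs[:i]}) >= threshold:
--                 n += 1
--             pairs = pairs[i:]
--     return n
-- ===== Notes on version B (the rewrite author's own statement) =====
-- stated objective: alternative
-- what changed: Replaces A's dict-of-sets grouping (hash map keyed by consonant accumulating word sets, then a scan over the dict's values) with a sort-then-scan: each line's pairs are sorted by consonant and consecutive equal-consonant runs are scanned in one pass, counting runs whose distinct-word set reaches the threshold.
import Mathlib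
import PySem

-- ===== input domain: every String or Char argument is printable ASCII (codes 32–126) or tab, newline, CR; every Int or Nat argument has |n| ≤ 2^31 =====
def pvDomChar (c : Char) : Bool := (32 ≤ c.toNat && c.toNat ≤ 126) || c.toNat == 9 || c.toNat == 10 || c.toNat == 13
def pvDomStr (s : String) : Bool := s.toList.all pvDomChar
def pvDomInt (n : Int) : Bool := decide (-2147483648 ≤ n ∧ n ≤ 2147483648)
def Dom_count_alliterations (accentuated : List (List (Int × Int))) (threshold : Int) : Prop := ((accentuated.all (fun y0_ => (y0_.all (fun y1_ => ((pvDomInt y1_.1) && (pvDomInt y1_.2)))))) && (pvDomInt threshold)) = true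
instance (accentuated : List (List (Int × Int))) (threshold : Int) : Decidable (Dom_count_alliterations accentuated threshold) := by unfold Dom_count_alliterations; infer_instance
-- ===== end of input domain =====

-- B replaces A's dict-of-sets grouping by a sort-then-scan over consecutive equal-consonant runs (alternative decomposition, same cost class).

-- ===== PORT A =====
def count_alliterations (accentuated : List (List (Int × Int))) (threshold : Int) : Int :=
  accentuated.foldl (fun n accents =>
    let counts : PySem.Dict Int (PySem.Set Int) :=
      accents.foldl (fun d p =>
        let d' := if d.contains p.2 then d else d.insert p.2 PySem.Set.empty
        d'.insert p.2 (PySem.Set.add (d'.getD p.2 PySem.Set.empty) p.1)) PySem.Dict.empty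
    counts.values.foldl (fun n val =>
      if threshold ≤ PySem.Set.len val then n + 1 else n) n) 0

-- ===== PORT B =====
-- the inner 'while pairs:' loop of Source B: count runs of equal second component
def pvAltLine (threshold : Int) : List (Int × Int) → Int
  | [] => 0
  | p :: rest =>
      let run := p :: rest.takeWhile (fun q => q.2 == p.2)
      (if threshold ≤ PySem.Set.len (PySem.Set.ofList (run.map (·.1))) then 1 else 0)
        + pvAltLine threshold (rest.dropWhile (fun q => q.2 == p.2))
termination_by l => l.length
decreasing_by
  simp only [List.length_cons]
  exact Nat.lt_succ_of_le (List.length_dropWhile_le _ _)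

def count_alliterations_alt (accentuated : List (List (Int × Int))) (threshold : Int) : Int :=
  accentuated.foldl (fun n accents =>
    n + pvAltLine threshold (PySem.List.sorted accents (fun q => q.2) false)) 0

-- ===== PRECONDITION & SPEC =====
def Spec_count_alliterations (accentuated : List (List (Int × Int))) (threshold : Int) (out : Int) : Prop := out = count_alliterations_alt accentuated threshold
instance (accentuated : List (List (Int × Int))) (threshold : Int) (out : Int) : Decidable (Spec_count_alliterations accentuated threshold out) := by unfold Spec_count_alliterations; infer_instance

-- ===== CLAIM (what is proved, stated in full; the proofs are below) =====
def Claim_equal_count_alliterations : Prop := ∀ (accentuated : List (List (Int × Int))) (threshold : Int), Dom_count_alliterations accentuated threshold → Spec_count_alliterations accentuated threshold (count_alliterations accentuated threshold)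

-- ===== LEMMAS AND PROOFS =====

-- the per-consonant predicate both programs decide: the distinct words with consonant c number >= threshold
def pvPred (t : Int) (ps : List (Int × Int)) (c : Int) : Bool :=
  decide (t ≤ PySem.Set.len (PySem.Set.ofList ((ps.filter (fun q => q.2 == c)).map (·.1))))

-- ---- A side: characterise the dict-building loop ----
def pvStepA (d : PySem.Dict Int (PySem.Set Int)) (p : Int × Int) : PySem.Dict Int (PySem.Set Int) :=
  let d' := if d.contains p.2 then d else d.insert p.2 PySem.Set.empty
  d'.insert p.2 (PySem.Set.add (d'.getD p.2 PySem.Set.empty) p.1)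

theorem pvStepA_getD (d : PySem.Dict Int (PySem.Set Int)) (p : Int × Int) (c : Int) :
    (pvStepA d p).getD c PySem.Set.empty =
      if c = p.2 then PySem.Set.add (d.getD p.2 PySem.Set.empty) p.1
      else d.getD c PySem.Set.empty := by
  unfold pvStepA
  by_cases hc : d.contains p.2 = true
  · simp only [hc, if_true, PySem.Dict.getD_insert]
  · have hc' : d.contains p.2 = false := by simpa using hc
    simp only [hc', Bool.false_eq_true, if_false, PySem.Dict.getD_insert,
      PySem.Dict.getD_of_not_contains d _ hc']
    split_ifs <;> simp

theorem pvStepA_keys (d : PySem.Dict Int (PySem.Set Int)) (p : Int × Int) :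
    (pvStepA d p).keys = PySem.Set.add d.keys p.2 := by
  unfold pvStepA
  by_cases hc : d.contains p.2 = true
  · rw [if_pos hc, PySem.Dict.keys_insert_of_contains d _ hc]
    have hm : p.2 ∈ d.keys := (PySem.Dict.contains_iff_mem_keys d p.2).mp hc
    simp [PySem.Set.add, PySem.Set.contains, hm]
  · have hc' : d.contains p.2 = false := by simpa using hc
    rw [if_neg hc]
    have h2 : (d.insert p.2 (PySem.Set.empty : PySem.Set Int)).contains p.2 = true :=
      PySem.Dict.contains_insert_self d p.2 _
    rw [PySem.Dict.keys_insert_of_contains _ _ h2,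
      PySem.Dict.keys_insert_of_not_contains d _ hc']
    have hm : p.2 ∉ d.keys := fun h => by
      rw [(PySem.Dict.contains_iff_mem_keys d p.2).mpr h] at hc'; cases hc'
    simp [PySem.Set.add, PySem.Set.contains, hm]

theorem pvFoldA_getD (l : List (Int × Int)) (d : PySem.Dict Int (PySem.Set Int)) (c : Int) :
    (l.foldl pvStepA d).getD c PySem.Set.empty =
      ((l.filter (fun q => q.2 == c)).map (·.1)).foldl PySem.Set.add
        (d.getD c PySem.Set.empty) := by
  induction l generalizing d with
  | nil => rfl
  | cons p l ih =>
      rw [List.foldl_cons, ih, pvStepA_getD, List.filter_cons]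
      by_cases hpc : p.2 = c
      · simp [hpc]
      · simp [hpc, Ne.symm hpc]

theorem pvFoldA_keys (l : List (Int × Int)) (d : PySem.Dict Int (PySem.Set Int)) :
    (l.foldl pvStepA d).keys = PySem.Set.update d.keys (l.map (·.2)) := by
  induction l generalizing d with
  | nil => rfl
  | cons p l ih =>
      rw [List.foldl_cons, ih, pvStepA_keys]
      rfl

theorem pvA_line (t : Int) (accents : List (Int × Int)) (n : Int) :
    (let counts : PySem.Dict Int (PySem.Set Int) :=
      accents.foldl (fun d p =>
        let d' := if d.contains p.2 then d else d.insert p.2 PySem.Set.empty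
        d'.insert p.2 (PySem.Set.add (d'.getD p.2 PySem.Set.empty) p.1)) PySem.Dict.empty
     counts.values.foldl (fun n val => if t ≤ PySem.Set.len val then n + 1 else n) n)
    = n + ((PySem.Set.ofList (accents.map (·.2))).countP (pvPred t accents) : Int) := by
  show (accents.foldl pvStepA PySem.Dict.empty).values.foldl
      (fun n val => if t ≤ PySem.Set.len val then n + 1 else n) n = _
  have hkeys : (accents.foldl pvStepA PySem.Dict.empty).keys
      = PySem.Set.ofList (accents.map (·.2)) := by
    rw [pvFoldA_keys, PySem.Dict.keys_empty, PySem.Set.ofList_eq_foldl]; rfl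
  have hnd : (accents.foldl pvStepA PySem.Dict.empty).keys.Nodup := by
    rw [hkeys]; exact PySem.Set.nodup_ofList _
  rw [PySem.Dict.values_eq_map_keys _ hnd PySem.Set.empty, List.foldl_map,
    PySem.List.foldl_ite_add_one
      (fun k => t ≤ PySem.Set.len ((accents.foldl pvStepA PySem.Dict.empty).getD k PySem.Set.empty)),
    hkeys]
  congr 2
  apply List.countP_congr
  intro c _
  rw [pvFoldA_getD, PySem.Dict.getD_empty, pvPred,
    show (PySem.Set.empty : PySem.Set Int) = [] from rfl, ← PySem.Set.ofList_eq_foldl]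

-- ---- B side: the run-scanning loop on a key-sorted list ----
theorem pvDropWhile_head {α : Type} (p : α → Bool) (l : List α) (x : α) (xs : List α)
    (h : l.dropWhile p = x :: xs) : p x = false := by
  induction l with
  | nil => simp at h
  | cons a l ih =>
      by_cases hpa : p a = true
      · rw [List.dropWhile_cons_of_pos hpa] at h
        exact ih h
      · rw [List.dropWhile_cons_of_neg hpa] at h
        cases h
        simpa using hpa

theorem pvB_line (t : Int) (ps : List (Int × Int))
    (h : (ps.map (·.2)).Pairwise (· ≤ ·)) :
    pvAltLine t ps = ((PySem.Set.ofList (ps.map (·.2))).countP (pvPred t ps) : Int) := by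
  induction hl : ps.length using Nat.strong_induction_on generalizing ps with
  | _ N ih =>
  match ps, h with
  | [], _ => simp [pvAltLine]
  | p :: rest, h =>
    subst hl
    set c := p.2 with hc
    set run := rest.takeWhile (fun q => q.2 == c) with hrundef
    set rest' := rest.dropWhile (fun q => q.2 == c) with hrestdef
    have hsplit : run ++ rest' = rest := List.takeWhile_append_dropWhile
    have hrun : ∀ q ∈ run, q.2 = c := fun q hq => by
      have := List.mem_takeWhile_imp hq; simpa using this
    have hpair : ∀ q ∈ rest, c ≤ q.2 := by
      intro q hq
      rw [List.map_cons, List.pairwise_cons] at h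
      exact h.1 _ (List.mem_map_of_mem hq)
    have hrest'pair : (rest'.map (·.2)).Pairwise (· ≤ ·) := by
      apply List.Pairwise.sublist (List.Sublist.map _ ((List.dropWhile_sublist _).trans (List.sublist_cons_self p rest)))
      exact h
    have hne : ∀ q ∈ rest', q.2 ≠ c := by
      cases hrr : rest' with
      | nil => intro q hq; cases hq
      | cons x xs =>
        have hdw : rest.dropWhile (fun q => q.2 == c) = x :: xs := hrestdef.symm.trans hrr
        have hx : (x.2 == c) = false := pvDropWhile_head _ rest x xs hdw
        have hxc : x.2 ≠ c := by simpa using hx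
        have hxrest : x ∈ rest :=
          (List.dropWhile_sublist _).subset (by rw [hdw]; exact List.mem_cons_self)
        have hcx : c < x.2 := lt_of_le_of_ne (hpair x hxrest) (Ne.symm hxc)
        intro q hq
        rcases List.mem_cons.mp hq with rfl | hq
        · exact hxc
        · have hxq : x.2 ≤ q.2 := by
            have hp2 : ((x :: xs).map (·.2)).Pairwise (· ≤ ·) := by rw [← hrr]; exact hrest'pair
            rw [List.map_cons, List.pairwise_cons] at hp2
            exact hp2.1 _ (List.mem_map_of_mem hq)
          exact fun hqc => absurd (hqc ▸ hxq) (not_le.mpr hcx)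
    have hmemrest' : ∀ q, q ∈ rest' → q ∈ rest := fun q hq =>
      (List.dropWhile_sublist _).subset (hrestdef ▸ hq)
    -- filter over the full line
    have hfil_c : (p :: rest).filter (fun q => q.2 == c) = p :: run := by
      rw [List.filter_cons, ← hsplit, List.filter_append]
      have h1 : run.filter (fun q => q.2 == c) = run :=
        List.filter_eq_self.mpr (fun a ha => by simp [hrun a ha])
      have h2 : rest'.filter (fun q => q.2 == c) = [] :=
        List.filter_eq_nil_iff.mpr (fun a ha => by simp [hne a ha])
      simp [h1, h2, hc.symm]
    have hfil_ne : ∀ c', c' ≠ c → (p :: rest).filter (fun q => q.2 == c')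
        = rest'.filter (fun q => q.2 == c') := by
      intro c' hc'
      rw [List.filter_cons, ← hsplit, List.filter_append]
      have h1 : run.filter (fun q => q.2 == c') = [] :=
        List.filter_eq_nil_iff.mpr (fun a ha => by simp [hrun a ha, Ne.symm hc'])
      have hp : (p.2 == c') = false := by simp [← hc, Ne.symm hc']
      simp [h1, hp]
    -- the key set of the full line is a permutation of c :: key set of rest'
    have hperm : (PySem.Set.ofList ((p :: rest).map (·.2))).Perm
        (c :: PySem.Set.ofList (rest'.map (·.2))) := by
      have hndl : (PySem.Set.ofList ((p :: rest).map (·.2))).Nodup := PySem.Set.nodup_ofList _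
      have hndr : (c :: PySem.Set.ofList (rest'.map (·.2))).Nodup := by
        refine List.nodup_cons.mpr ⟨?_, PySem.Set.nodup_ofList _⟩
        intro hcmem
        rw [PySem.Set.mem_ofList] at hcmem
        obtain ⟨q, hq, hq2⟩ := List.mem_map.mp hcmem
        exact hne q hq hq2
      refine (List.perm_ext_iff_of_nodup hndl hndr).mpr ?_
      intro a
      rw [PySem.Set.mem_ofList, List.mem_cons, PySem.Set.mem_ofList]
      constructor
      · intro ha
        obtain ⟨q, hq, hq2⟩ := List.mem_map.mp ha
        rcases List.mem_cons.mp hq with rfl | hq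
        · exact Or.inl hq2.symm
        · rcases (List.mem_append.mp (by rw [hsplit]; exact hq : q ∈ run ++ rest')) with hq | hq
          · exact Or.inl (by rw [← hq2, hrun q hq])
          · exact Or.inr (List.mem_map.mpr ⟨q, hq, hq2⟩)
      · intro ha
        rcases ha with rfl | ha
        · exact List.mem_map.mpr ⟨p, List.mem_cons_self, rfl⟩
        · obtain ⟨q, hq, hq2⟩ := List.mem_map.mp ha
          exact List.mem_map.mpr ⟨q, List.mem_cons_of_mem _ (hmemrest' q hq), hq2⟩
    -- compute the RHS count
    rw [List.Perm.countP_eq _ hperm, List.countP_cons]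
    have hpredc : pvPred t (p :: rest) c = decide
        (t ≤ PySem.Set.len (PySem.Set.ofList ((p :: run).map (·.1)))) := by
      rw [pvPred, hfil_c]
    have hpredrest : (PySem.Set.ofList (rest'.map (·.2))).countP (pvPred t (p :: rest))
        = (PySem.Set.ofList (rest'.map (·.2))).countP (pvPred t rest') := by
      apply List.countP_congr
      intro c' hc'
      rw [PySem.Set.mem_ofList] at hc'
      obtain ⟨q, hq, hq2⟩ := List.mem_map.mp hc'
      have hc'ne : c' ≠ c := hq2 ▸ hne q hq
      rw [pvPred, pvPred, hfil_ne c' hc'ne]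
    rw [hpredrest, hpredc]
    -- compute the LHS step
    have hlen : rest'.length < (p :: rest).length := by
      simp only [List.length_cons]
      exact Nat.lt_succ_of_le (List.length_dropWhile_le _ _)
    have hrec : pvAltLine t rest'
        = ((PySem.Set.ofList (rest'.map (·.2))).countP (pvPred t rest') : Int) :=
      ih rest'.length hlen rest' hrest'pair rfl
    rw [pvAltLine, ← hrundef, ← hrestdef, hrec]
    by_cases hif : t ≤ PySem.Set.len (PySem.Set.ofList ((p :: run).map (·.1)))
    · simp only [hif, if_true, decide_true]
      push_cast
      ring
    · simp only [hif, if_false, decide_false]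
      push_cast
      ring

-- ---- the two line counts agree ----
theorem pvLenOfList_perm (l1 l2 : List Int) (h : l1.Perm l2) :
    PySem.Set.len (PySem.Set.ofList l1) = PySem.Set.len (PySem.Set.ofList l2) := by
  have : (PySem.Set.ofList l1).Perm (PySem.Set.ofList l2) := by
    refine (List.perm_ext_iff_of_nodup (PySem.Set.nodup_ofList _) (PySem.Set.nodup_ofList _)).mpr ?_
    intro a
    rw [PySem.Set.mem_ofList, PySem.Set.mem_ofList]
    exact ⟨fun ha => h.mem_iff.mp ha, fun ha => h.mem_iff.mpr ha⟩
  simp [PySem.Set.len, this.length_eq]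

theorem pvLine_eq (t : Int) (accents : List (Int × Int)) (n : Int) :
    (let counts : PySem.Dict Int (PySem.Set Int) :=
      accents.foldl (fun d p =>
        let d' := if d.contains p.2 then d else d.insert p.2 PySem.Set.empty
        d'.insert p.2 (PySem.Set.add (d'.getD p.2 PySem.Set.empty) p.1)) PySem.Dict.empty
     counts.values.foldl (fun n val => if t ≤ PySem.Set.len val then n + 1 else n) n)
    = n + pvAltLine t (PySem.List.sorted accents (fun q => q.2) false) := by
  rw [pvA_line]
  have hsp : (PySem.List.sorted accents (fun q => q.2) false).Perm accents :=
    PySem.List.sorted_perm accents _ false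
  rw [pvB_line t _ (PySem.List.sorted_map_key_pairwise accents (fun q => q.2))]
  congr 2
  have hpred : ∀ c, pvPred t (PySem.List.sorted accents (fun q => q.2) false) c
      = pvPred t accents c := by
    intro c
    unfold pvPred
    congr 1
    have := (hsp.filter (fun q => q.2 == c)).map (·.1)
    exact congrArg (fun k => t ≤ k) (pvLenOfList_perm _ _ this)
  have hkperm : (PySem.Set.ofList ((PySem.List.sorted accents (fun q => q.2) false).map (·.2))).Perm
      (PySem.Set.ofList (accents.map (·.2))) := by
    refine (List.perm_ext_iff_of_nodup (PySem.Set.nodup_ofList _) (PySem.Set.nodup_ofList _)).mpr ?_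
    intro a
    rw [PySem.Set.mem_ofList, PySem.Set.mem_ofList]
    exact (hsp.map (·.2)).mem_iff
  calc (PySem.Set.ofList (accents.map (·.2))).countP (pvPred t accents)
      = (PySem.Set.ofList ((PySem.List.sorted accents (fun q => q.2) false).map (·.2))).countP
          (pvPred t accents) := (List.Perm.countP_eq _ hkperm).symm
    _ = _ := List.countP_congr (fun c _ => by rw [hpred c])

-- ===== VERDICT (by name: the statement is the Claim_ definition above) =====
theorem count_alliterations_spec : Claim_equal_count_alliterations := by
  intro accentuated threshold hdom
  clear hdom
  show count_alliterations accentuated threshold = count_alliterations_alt accentuated threshold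
  unfold count_alliterations count_alliterations_alt
  generalize (0 : Int) = n
  induction accentuated generalizing n with
  | nil => rfl
  | cons a l ih =>
      simp only [List.foldl_cons]
      rw [pvLine_eq threshold a n]
      exact ih _
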